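-- pv_equiv track=rewrite | github.com/CAG2Mark/aoc-2024 | day04/p2.py | create_all
-- ===== SOURCE A (Python) =====
-- def create(board, r, c, diffs):
--     ROWS = len(board)
--     COLS = len(board[0])
--     s = []
--     while 0 <= r < ROWS and 0 <= c < COLS:
--         s.append((r, c))
--         r += diffs[0]
--         c += diffs[1]
--     return s
--
-- def create_all(board):
--     ROWS = len(board)
--     COLS = len(board[0])
--
--     strs = []
--
--     # diag \
--     for i in range(ROWS):
--         strs.append(create(board, i, 0, [1, 1]))
--     for i in range(1, COLS):
--         strs.append(create(board, 0, i, [1, 1]))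
--     # diag /
--     for i in range(COLS):
--         strs.append(create(board, 0, i, [1, -1]))
--     for i in range(1, ROWS):
--         strs.append(create(board, i, COLS - 1, [1, -1]))
--
--     return strs
-- ===== SOURCE B (Python) =====
-- def create_all(board):
--     ROWS = len(board)
--     COLS = len(board[0])
--     back = {}   # key r - c  (the '\' family)
--     fwd = {}    # key r + c  (the '/' family)
--     for r in range(ROWS):
--         for c in range(COLS):
--             back.setdefault(r - c, []).append((r, c))
--             fwd.setdefault(r + c, []).append((r, c))
--     strs = []
--     for k in range(ROWS):
--         strs.append(back.get(k, []))
--     for k in range(1, COLS):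
--         strs.append(back.get(-k, []))
--     for k in range(COLS):
--         strs.append(fwd.get(k, []))
--     for k in range(COLS, ROWS + COLS - 1):
--         strs.append(fwd.get(k, []))
--     return strs
-- ===== Notes on version B (the rewrite author's own statement) =====
-- stated objective: alternative
-- what changed: replaces A's per-diagonal while-loop walks (one walk per start cell, restarting a bounds-checked scan for every diagonal) by a single row-major pass that buckets every cell into two dicts keyed by r-c and r+c, then emits the buckets in A's original key order
import Mathlib
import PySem

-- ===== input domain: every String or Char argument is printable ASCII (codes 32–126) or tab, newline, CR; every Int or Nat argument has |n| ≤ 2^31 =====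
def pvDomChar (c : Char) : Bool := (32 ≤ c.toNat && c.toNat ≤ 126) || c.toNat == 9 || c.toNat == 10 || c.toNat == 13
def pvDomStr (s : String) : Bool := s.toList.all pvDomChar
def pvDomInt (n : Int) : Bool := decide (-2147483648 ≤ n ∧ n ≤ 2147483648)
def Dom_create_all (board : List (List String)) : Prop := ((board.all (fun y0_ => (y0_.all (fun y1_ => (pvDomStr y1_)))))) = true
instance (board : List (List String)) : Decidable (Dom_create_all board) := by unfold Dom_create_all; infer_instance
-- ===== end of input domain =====

-- B replaces A's per-diagonal while-loop walks by one row-major pass bucketing each cell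
-- into two dicts keyed by r-c and r+c, then emits the buckets in A's key order
-- (alternative decomposition, same asymptotic cost).

-- ===== PORT A =====
-- the while loop of `create`; the fuel passed by `create` strictly exceeds the iteration
-- count of every call create_all makes (diffs[0] = 1, so at most ROWS iterations happen)
def createGo (R C dr dc : Int) (r c : Int) : Nat → List (Int × Int)
  | 0 => []
  | Nat.succ fuel =>
    if 0 ≤ r ∧ r < R ∧ 0 ≤ c ∧ c < C then
      (r, c) :: createGo R C dr dc (r + dr) (c + dc) fuel
    else []

def create (board : List (List String)) (r c : Int) (diffs : List Int) : List (Int × Int) :=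
  createGo (board.length : Int) ((board.headD []).length : Int)
    (diffs.headD 0) (diffs.getD 1 0) r c (board.length + 1)

def create_all (board : List (List String)) : List (List (Int × Int)) :=
  let R := board.length
  let C := (board.headD []).length
  ((List.range R).map (fun i : Nat => create board (i : Int) 0 [1, 1]))
  ++ ((List.range (C - 1)).map (fun i : Nat => create board 0 ((i : Int) + 1) [1, 1]))
  ++ ((List.range C).map (fun i : Nat => create board 0 (i : Int) [1, -1]))
  ++ ((List.range (R - 1)).map
        (fun i : Nat => create board ((i : Int) + 1) ((C : Int) - 1) [1, -1]))

-- ===== PORT B =====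
-- the cells visited by B's nested `for r … for c …` loops, in row-major order
def bCells (n m : Nat) : List (Int × Int) :=
  (List.range n).flatMap (fun r : Nat => (List.range m).map (fun c : Nat => ((r : Int), (c : Int))))

-- the single pass: `back.setdefault(r-c, []).append((r,c)); fwd.setdefault(r+c, []).append((r,c))`
-- (setdefault-then-append is Dict.modify with default [])
def bBuckets (n m : Nat) :
    PySem.Dict Int (List (Int × Int)) × PySem.Dict Int (List (Int × Int)) :=
  (bCells n m).foldl
    (fun bf p => (bf.1.modify (p.1 - p.2) [] (· ++ [p]), bf.2.modify (p.1 + p.2) [] (· ++ [p])))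
    (PySem.Dict.empty, PySem.Dict.empty)

def create_all_alt (board : List (List String)) : List (List (Int × Int)) :=
  let n := board.length
  let m := (board.headD []).length
  let back := (bBuckets n m).1
  let fwd := (bBuckets n m).2
  ((List.range n).map (fun k : Nat => back.getD (k : Int) []))
  ++ ((List.range (m - 1)).map (fun i : Nat => back.getD (-((i : Int) + 1)) []))
  ++ ((List.range m).map (fun k : Nat => fwd.getD (k : Int) []))
  ++ ((List.range (n - 1)).map (fun i : Nat => fwd.getD ((m : Int) + (i : Int)) []))

-- ===== PRECONDITION & SPEC =====
-- Pre_ excludes only the empty board, on which Python A raises IndexError at board[0].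
def Pre_create_all (board : List (List String)) : Prop := board ≠ []
instance (board : List (List String)) : Decidable (Pre_create_all board) := by
  unfold Pre_create_all; infer_instance

def pvWitness_create_all : List (List String) := [["a", "b"], ["c", "d"]]

def Spec_create_all (board : List (List String)) (out : List (List (Int × Int))) : Prop :=
  out = create_all_alt board
instance (board : List (List String)) (out : List (List (Int × Int))) :
    Decidable (Spec_create_all board out) := by unfold Spec_create_all; infer_instance

-- ===== CLAIM (what is proved, stated in full; the proofs are below) =====
def Claim_equal_create_all : Prop :=
  ∀ (board : List (List String)), Dom_create_all board → Pre_create_all board →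
    Spec_create_all board (create_all board)

-- ===== LEMMAS AND PROOFS =====

-- canonical form of a '\' diagonal (key k = r - c) and of a '/' diagonal (key k = r + c)
def gDiag (n m : Nat) (k : Int) : List (Int × Int) :=
  (List.range n).flatMap
    (fun r : Nat => if k ≤ (r : Int) ∧ (r : Int) < k + m then [((r : Int), (r : Int) - k)] else [])

def hDiag (n m : Nat) (k : Int) : List (Int × Int) :=
  (List.range n).flatMap
    (fun r : Nat => if k - m < (r : Int) ∧ (r : Int) ≤ k then [((r : Int), k - (r : Int))] else [])

-- B side: a bucketing fold, looked up afterwards, is a filter of the traversal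
theorem getD_bucket_sub :
    ∀ (l : List (Int × Int)) (d : PySem.Dict Int (List (Int × Int))) (k : Int),
      (l.foldl (fun d p => d.modify (p.1 - p.2) [] (· ++ [p])) d).getD k []
        = d.getD k [] ++ l.filter (fun p => p.1 - p.2 == k) := by
  intro l
  induction l with
  | nil => intro d k; simp
  | cons p t ih =>
    intro d k
    rw [List.foldl_cons, ih, List.filter_cons, PySem.Dict.getD_modify]
    by_cases h : k = p.1 - p.2
    · have hb : (p.1 - p.2 == k) = true := by rw [h]; exact beq_self_eq_true _
      rw [if_pos h, if_pos hb, h, List.append_assoc, List.singleton_append]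
    · have hb : ¬ ((p.1 - p.2 == k) = true) := fun hx => h (beq_iff_eq.mp hx).symm
      rw [if_neg h, if_neg hb]

theorem getD_bucket_add :
    ∀ (l : List (Int × Int)) (d : PySem.Dict Int (List (Int × Int))) (k : Int),
      (l.foldl (fun d p => d.modify (p.1 + p.2) [] (· ++ [p])) d).getD k []
        = d.getD k [] ++ l.filter (fun p => p.1 + p.2 == k) := by
  intro l
  induction l with
  | nil => intro d k; simp
  | cons p t ih =>
    intro d k
    rw [List.foldl_cons, ih, List.filter_cons, PySem.Dict.getD_modify]
    by_cases h : k = p.1 + p.2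
    · have hb : (p.1 + p.2 == k) = true := by rw [h]; exact beq_self_eq_true _
      rw [if_pos h, if_pos hb, h, List.append_assoc, List.singleton_append]
    · have hb : ¬ ((p.1 + p.2 == k) = true) := fun hx => h (beq_iff_eq.mp hx).symm
      rw [if_neg h, if_neg hb]

-- B's two independent dict accumulators, split into two folds
theorem foldl_pair_split :
    ∀ (l : List (Int × Int)) (d₁ d₂ : PySem.Dict Int (List (Int × Int))),
      l.foldl
        (fun bf p => (bf.1.modify (p.1 - p.2) [] (· ++ [p]), bf.2.modify (p.1 + p.2) [] (· ++ [p])))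
        (d₁, d₂)
      = (l.foldl (fun d p => d.modify (p.1 - p.2) [] (· ++ [p])) d₁,
         l.foldl (fun d p => d.modify (p.1 + p.2) [] (· ++ [p])) d₂) := by
  intro l
  induction l with
  | nil => intro d₁ d₂; rfl
  | cons p t ih =>
    intro d₁ d₂
    rw [List.foldl_cons, List.foldl_cons, List.foldl_cons]
    exact ih _ _

-- B's two independent dict accumulators, split into two folds
theorem buckets_eq (n m : Nat) :
    bBuckets n m
      = ((bCells n m).foldl (fun d p => d.modify (p.1 - p.2) [] (· ++ [p])) PySem.Dict.empty,
         (bCells n m).foldl (fun d p => d.modify (p.1 + p.2) [] (· ++ [p])) PySem.Dict.empty) := by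
  unfold bBuckets
  exact foldl_pair_split _ _ _

theorem range_filter_int (m : Nat) (j : Int) :
    (List.range m).filter (fun c : Nat => (j == (c : Int)))
      = if 0 ≤ j ∧ j < m then [j.toNat] else [] := by
  induction m with
  | zero =>
    have h : ¬ (0 ≤ j ∧ j < ((0 : Nat) : Int)) := by omega
    rw [if_neg h]
    simp
  | succ m ih =>
    rw [List.range_succ, List.filter_append, ih]
    by_cases h : j = m
    · have h1 : ¬ (0 ≤ j ∧ j < (m : Int)) := by omega
      have h2 : 0 ≤ j ∧ j < ((m + 1 : Nat) : Int) := by push_cast; omega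
      have hb : (j == (m : Int)) = true := by rw [h]; exact beq_self_eq_true _
      simp only [if_neg h1, if_pos h2, List.filter_cons, List.filter_nil, hb, if_pos]
      simp
      omega
    · have hb : (j == (m : Int)) = false := by simp [h]
      have hiff : (0 ≤ j ∧ j < ((m + 1 : Nat) : Int)) ↔ (0 ≤ j ∧ j < (m : Int)) := by
        push_cast; omega
      simp only [List.filter_cons, List.filter_nil, hb]
      rw [if_congr hiff rfl rfl]
      simp

theorem cells_filter_back (n m : Nat) (k : Int) :
    (bCells n m).filter (fun p => p.1 - p.2 == k) = gDiag n m k := by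
  unfold bCells gDiag
  rw [List.filter_flatMap]
  congr 1
  funext r
  rw [List.filter_map]
  have hc : ((fun p : Int × Int => p.1 - p.2 == k) ∘ fun c : Nat => ((r : Int), (c : Int)))
      = fun c : Nat => ((r : Int) - k == (c : Int)) := by
    funext c; simp only [Function.comp]
    by_cases h : (r : Int) - (c : Int) = k
    · have h' : (r : Int) - k = (c : Int) := by omega
      simp [h, h']
    · have h2 : ¬ ((r : Int) - k = (c : Int)) := by omega
      simp [h, h2]
  rw [hc, range_filter_int]
  by_cases h : k ≤ (r : Int) ∧ (r : Int) < k + m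
  · have h1 : 0 ≤ (r : Int) - k ∧ (r : Int) - k < m := by omega
    have h2 : ((((r : Int) - k).toNat : Nat) : Int) = (r : Int) - k := by omega
    simp only [if_pos h1, if_pos h, List.map_cons, List.map_nil, h2]
  · have h1 : ¬ (0 ≤ (r : Int) - k ∧ (r : Int) - k < m) := by omega
    simp only [if_neg h1, if_neg h, List.map_nil]

theorem cells_filter_fwd (n m : Nat) (k : Int) :
    (bCells n m).filter (fun p => p.1 + p.2 == k) = hDiag n m k := by
  unfold bCells hDiag
  rw [List.filter_flatMap]
  congr 1
  funext r
  rw [List.filter_map]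
  have hc : ((fun p : Int × Int => p.1 + p.2 == k) ∘ fun c : Nat => ((r : Int), (c : Int)))
      = fun c : Nat => (k - (r : Int) == (c : Int)) := by
    funext c; simp only [Function.comp]
    by_cases h : (r : Int) + (c : Int) = k
    · have h' : k - (r : Int) = (c : Int) := by omega
      simp [h, h']
    · have h2 : ¬ (k - (r : Int) = (c : Int)) := by omega
      simp [h, h2]
  rw [hc, range_filter_int]
  by_cases h : k - m < (r : Int) ∧ (r : Int) ≤ k
  · have h1 : 0 ≤ k - (r : Int) ∧ k - (r : Int) < m := by omega
    have h2 : (((k - (r : Int)).toNat : Nat) : Int) = k - (r : Int) := by omega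
    simp only [if_pos h1, if_pos h, List.map_cons, List.map_nil, h2]
  · have h1 : ¬ (0 ≤ k - (r : Int) ∧ k - (r : Int) < m) := by omega
    simp only [if_neg h1, if_neg h, List.map_nil]

theorem buckets_back (n m : Nat) (k : Int) :
    (bBuckets n m).1.getD k [] = gDiag n m k := by
  rw [buckets_eq]
  rw [show (∀ (x y : PySem.Dict Int (List (Int × Int))), (x, y).1 = x) from fun _ _ => rfl]
  rw [getD_bucket_sub, cells_filter_back]
  simp

theorem buckets_fwd (n m : Nat) (k : Int) :
    (bBuckets n m).2.getD k [] = hDiag n m k := by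
  rw [buckets_eq]
  rw [getD_bucket_add, cells_filter_fwd]
  simp

-- A side: the while loop with step (1, 1) is a map over a range
theorem createGo_spec1 :
    ∀ (fuel : Nat) (R C r c : Int), (R - r).toNat ≤ fuel → 0 ≤ r → 0 ≤ c →
      createGo R C 1 1 r c fuel
        = (List.range (min (R - r) (C - c)).toNat).map
            (fun t : Nat => (r + (t : Int), c + (t : Int))) := by
  intro fuel
  induction fuel with
  | zero =>
    intro R C r c hf h0 h1
    have h : (min (R - r) (C - c)).toNat = 0 := by omega
    simp [createGo, h]
  | succ fuel ih =>
    intro R C r c hf h0 h1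
    by_cases hg : 0 ≤ r ∧ r < R ∧ 0 ≤ c ∧ c < C
    · rw [createGo, if_pos hg, ih R C (r + 1) (c + 1) (by omega) (by omega) (by omega)]
      have hK : (min (R - r) (C - c)).toNat = (min (R - (r + 1)) (C - (c + 1))).toNat + 1 := by
        omega
      rw [hK, List.range_succ_eq_map, List.map_cons, List.map_map]
      congr 1
      · simp
      · apply List.map_congr_left
        intro t _
        simp only [Function.comp, Nat.succ_eq_add_one, Prod.mk.injEq]
        constructor <;> push_cast <;> ring
    · rw [createGo, if_neg hg]
      have h : (min (R - r) (C - c)).toNat = 0 := by omega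
      simp [h]

-- A side: the while loop with step (1, -1) is a map over a range
theorem createGo_spec2 :
    ∀ (fuel : Nat) (R C r c : Int), (R - r).toNat ≤ fuel → 0 ≤ r → c < C →
      createGo R C 1 (-1) r c fuel
        = (List.range (min (R - r) (c + 1)).toNat).map
            (fun t : Nat => (r + (t : Int), c - (t : Int))) := by
  intro fuel
  induction fuel with
  | zero =>
    intro R C r c hf h0 h1
    have h : (min (R - r) (c + 1)).toNat = 0 := by omega
    simp [createGo, h]
  | succ fuel ih =>
    intro R C r c hf h0 h1
    by_cases hg : 0 ≤ r ∧ r < R ∧ 0 ≤ c ∧ c < C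
    · rw [createGo, if_pos hg, ih R C (r + 1) (c + -1) (by omega) (by omega) (by omega)]
      have hK : (min (R - r) (c + 1)).toNat = (min (R - (r + 1)) ((c + -1) + 1)).toNat + 1 := by
        omega
      rw [hK, List.range_succ_eq_map, List.map_cons, List.map_map]
      congr 1
      · simp
      · apply List.map_congr_left
        intro t _
        simp only [Function.comp, Nat.succ_eq_add_one, Prod.mk.injEq]
        constructor <;> push_cast <;> ring
    · rw [createGo, if_neg hg]
      have h : (min (R - r) (c + 1)).toNat = 0 := by omega
      simp [h]

-- the '\' starts A uses (column 0 or row 0) produce exactly the r-c buckets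
theorem backFamily (n m : Nat) (r0 c0 : Int) (h0 : 0 ≤ r0) (h1 : 0 ≤ c0)
    (h2 : min r0 c0 = 0) :
    (List.range (min ((n : Int) - r0) ((m : Int) - c0)).toNat).map
        (fun t : Nat => (r0 + (t : Int), c0 + (t : Int)))
      = gDiag n m (r0 - c0) := by
  induction n with
  | zero =>
    have h : (min (((0 : Nat) : Int) - r0) ((m : Int) - c0)).toNat = 0 := by omega
    rw [h]
    simp [gDiag]
  | succ n ih =>
    unfold gDiag at ih ⊢
    rw [List.range_succ, List.flatMap_append, ← ih]
    simp only [List.flatMap_cons, List.flatMap_nil, List.append_nil]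
    by_cases hc : (r0 - c0) ≤ (n : Int) ∧ (n : Int) < (r0 - c0) + m
    · have hK : (min (((n + 1 : Nat) : Int) - r0) ((m : Int) - c0)).toNat
          = (min ((n : Int) - r0) ((m : Int) - c0)).toNat + 1 := by
        push_cast; omega
      rw [hK, List.range_succ, List.map_append, if_pos hc]
      congr 1
      simp only [List.map_cons, List.map_nil, List.cons.injEq, and_true, Prod.mk.injEq]
      constructor <;> omega
    · have hK : (min (((n + 1 : Nat) : Int) - r0) ((m : Int) - c0)).toNat
          = (min ((n : Int) - r0) ((m : Int) - c0)).toNat := by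
        push_cast; omega
      rw [hK, if_neg hc, List.append_nil]

-- the '/' starts A uses (row 0 or last column) produce exactly the r+c buckets
theorem fwdFamily (n m : Nat) (r0 c0 : Int) (h0 : 0 ≤ r0) (h1 : c0 < m)
    (h2 : min r0 ((m : Int) - 1 - c0) = 0) :
    (List.range (min ((n : Int) - r0) (c0 + 1)).toNat).map
        (fun t : Nat => (r0 + (t : Int), c0 - (t : Int)))
      = hDiag n m (r0 + c0) := by
  induction n with
  | zero =>
    have h : (min (((0 : Nat) : Int) - r0) (c0 + 1)).toNat = 0 := by omega
    rw [h]
    simp [hDiag]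
  | succ n ih =>
    unfold hDiag at ih ⊢
    rw [List.range_succ, List.flatMap_append, ← ih]
    simp only [List.flatMap_cons, List.flatMap_nil, List.append_nil]
    by_cases hc : (r0 + c0) - m < (n : Int) ∧ (n : Int) ≤ r0 + c0
    · have hK : (min (((n + 1 : Nat) : Int) - r0) (c0 + 1)).toNat
          = (min ((n : Int) - r0) (c0 + 1)).toNat + 1 := by
        push_cast; omega
      rw [hK, List.range_succ, List.map_append, if_pos hc]
      congr 1
      simp only [List.map_cons, List.map_nil, List.cons.injEq, and_true, Prod.mk.injEq]
      constructor <;> omega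
    · have hK : (min (((n + 1 : Nat) : Int) - r0) (c0 + 1)).toNat
          = (min ((n : Int) - r0) (c0 + 1)).toNat := by
        push_cast; omega
      rw [hK, if_neg hc, List.append_nil]

-- ===== VERDICT (by name: the statement is the Claim_ definition above) =====
theorem create_all_spec : Claim_equal_create_all := by
  intro board _ _
  unfold Spec_create_all
  have key1 : ∀ (r0 c0 : Int), 0 ≤ r0 → 0 ≤ c0 → min r0 c0 = 0 →
      create board r0 c0 [1, 1]
        = gDiag board.length (board.headD []).length (r0 - c0) := by
    intro r0 c0 h0 h1 h2
    show createGo (board.length : Int) ((board.headD []).length : Int) 1 1 r0 c0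
        (board.length + 1) = _
    rw [createGo_spec1 _ _ _ _ _ (by omega) h0 h1]
    exact backFamily _ _ _ _ h0 h1 h2
  have key2 : ∀ (r0 c0 : Int), 0 ≤ r0 → c0 < ((board.headD []).length : Int) →
      min r0 (((board.headD []).length : Int) - 1 - c0) = 0 →
      create board r0 c0 [1, -1]
        = hDiag board.length (board.headD []).length (r0 + c0) := by
    intro r0 c0 h0 h1 h2
    show createGo (board.length : Int) ((board.headD []).length : Int) 1 (-1) r0 c0
        (board.length + 1) = _
    rw [createGo_spec2 _ _ _ _ _ (by omega) h0 h1]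
    exact fwdFamily _ _ _ _ h0 h1 h2
  simp only [create_all, create_all_alt]
  have e1 : (List.range board.length).map (fun i : Nat => create board (i : Int) 0 [1, 1])
      = (List.range board.length).map
          (fun k : Nat => (bBuckets board.length (board.headD []).length).1.getD (k : Int) []) := by
    apply List.map_congr_left
    intro i _
    rw [key1 (i : Int) 0 (by omega) le_rfl (by omega), buckets_back]
    congr 1
  have e2 : (List.range ((board.headD []).length - 1)).map
        (fun i : Nat => create board 0 ((i : Int) + 1) [1, 1])
      = (List.range ((board.headD []).length - 1)).map
          (fun i : Nat =>
            (bBuckets board.length (board.headD []).length).1.getD (-((i : Int) + 1)) []) := by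
    apply List.map_congr_left
    intro i _
    rw [key1 0 ((i : Int) + 1) le_rfl (by omega) (by omega), buckets_back]
    congr 1
  have e3 : (List.range (board.headD []).length).map
        (fun i : Nat => create board 0 (i : Int) [1, -1])
      = (List.range (board.headD []).length).map
          (fun k : Nat => (bBuckets board.length (board.headD []).length).2.getD (k : Int) []) := by
    apply List.map_congr_left
    intro i hi
    have hlt : (i : Int) < ((board.headD []).length : Int) := by
      have := List.mem_range.mp hi; omega
    rw [key2 0 (i : Int) le_rfl hlt (by omega), buckets_fwd]
    congr 1
    ring
  have e4 : (List.range (board.length - 1)).map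
        (fun i : Nat => create board ((i : Int) + 1) (((board.headD []).length : Int) - 1) [1, -1])
      = (List.range (board.length - 1)).map
          (fun i : Nat =>
            (bBuckets board.length (board.headD []).length).2.getD
              (((board.headD []).length : Int) + (i : Int)) []) := by
    apply List.map_congr_left
    intro i hi
    have hlt : i < board.length - 1 := List.mem_range.mp hi
    rw [key2 ((i : Int) + 1) (((board.headD []).length : Int) - 1) (by omega) (by omega)
      (by omega), buckets_fwd]
    congr 1
    ring
  rw [e1, e2, e3, e4]
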